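-- pv_equiv track=rewrite | github.com/LSailer/Lecuture-AGI-Project | src/nonogram/enviroment.py | _line_satisfied
-- ===== SOURCE A (Python) =====
-- from typing import List, Tuple, Optional
--
-- Cell = int  # -1 unknown, 0 empty, 1 filled
--
-- def _line_satisfied(cells: List[Cell], hints: List[int]) -> bool:
--     """Exact satisfaction (no unknowns) for solved check."""
--     if any(c == -1 for c in cells):
--         return False
--     groups: List[int] = []
--     run = 0
--     for c in cells:
--         if c == 1:
--             run += 1
--         else:
--             if run > 0:
--                 groups.append(run)
--                 run = 0
--     if run > 0:
--         groups.append(run)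
--     return groups == hints
-- ===== SOURCE B (Python) =====
-- from typing import List
--
-- Cell = int  # -1 unknown, 0 empty, 1 filled
--
-- def _line_satisfied(cells: List[Cell], hints: List[int]) -> bool:
--     """Exact satisfaction (no unknowns) for solved check."""
--     if -1 in cells:
--         return False
--     s = ''.join('1' if c == 1 else '0' for c in cells)
--     groups = [len(p) for p in s.split('0') if p]
--     return groups == hints
-- ===== Notes on version B (the rewrite author's own statement) =====
-- stated objective: idiomatic
-- what changed: Derives the filled-run lengths by rendering the line as a 0/1 string and tokenizing with str.split('0') (lengths of the non-empty pieces), instead of stepping a manual run counter with an explicit flush at each separator and at the end.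
import Mathlib
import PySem

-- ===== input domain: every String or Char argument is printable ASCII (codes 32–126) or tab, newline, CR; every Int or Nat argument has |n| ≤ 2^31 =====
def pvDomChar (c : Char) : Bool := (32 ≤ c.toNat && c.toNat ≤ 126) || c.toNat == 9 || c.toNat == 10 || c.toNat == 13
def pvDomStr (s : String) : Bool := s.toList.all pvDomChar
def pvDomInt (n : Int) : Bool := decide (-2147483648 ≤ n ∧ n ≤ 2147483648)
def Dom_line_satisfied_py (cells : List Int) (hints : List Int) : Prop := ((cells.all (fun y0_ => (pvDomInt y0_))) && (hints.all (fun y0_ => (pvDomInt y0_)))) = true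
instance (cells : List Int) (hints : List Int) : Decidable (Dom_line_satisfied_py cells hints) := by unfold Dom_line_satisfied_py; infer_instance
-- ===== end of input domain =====

-- B derives the run groups by rendering the line as a 0/1 string and splitting on '0'
-- instead of A's manual run counter with flushes; objective: idiomatic (same O(n) cost).

-- ===== PORT A =====
-- loop body of A: state = (groups, run)
def pvStepA (st : List Int × Int) (c : Int) : List Int × Int :=
  if c == 1 then (st.1, st.2 + 1)
  else if st.2 > 0 then (st.1 ++ [st.2], 0) else (st.1, st.2)

-- trailing "if run > 0: groups.append(run)" flush
def pvFlush (st : List Int × Int) : List Int :=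
  if st.2 > 0 then st.1 ++ [st.2] else st.1

def line_satisfied_py (cells : List Int) (hints : List Int) : Bool :=
  if cells.any (fun c => c == -1) then false
  else
    pvFlush (cells.foldl pvStepA ([], 0)) == hints

-- ===== PORT B =====
-- '1' if c == 1 else '0'
def pvBit (c : Int) : Char := if c == 1 then '1' else '0'

def line_satisfied_py_alt (cells : List Int) (hints : List Int) : Bool :=
  if cells.contains (-1) then false
  else
    ((PySem.Chars.splitOn (cells.map pvBit) ['0']).filter (fun p => !p.isEmpty)).map
      (fun p => (p.length : Int)) == hints

-- ===== PRECONDITION & SPEC =====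
def Spec_line_satisfied_py (cells : List Int) (hints : List Int) (out : Bool) : Prop := out = line_satisfied_py_alt cells hints
instance (cells : List Int) (hints : List Int) (out : Bool) : Decidable (Spec_line_satisfied_py cells hints out) := by unfold Spec_line_satisfied_py; infer_instance

-- ===== CLAIM (what is proved, stated in full; the proofs are below) =====
def Claim_equal_line_satisfied_py : Prop := ∀ (cells : List Int) (hints : List Int), Dom_line_satisfied_py cells hints → Spec_line_satisfied_py cells hints (line_satisfied_py cells hints)

-- ===== LEMMAS AND PROOFS =====

-- run groups of a line, relative to a run already in progress
def pvRunsF (run : Int) : List Int → List Int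
  | [] => if run > 0 then [run] else []
  | c :: cs => if c = 1 then pvRunsF (run + 1) cs else (if run > 0 then [run] else []) ++ pvRunsF 0 cs

-- direct recursion computing split-on-'0' with the current piece as accumulator
def pvSplit0 (pre : List Char) : List Char → List (List Char)
  | [] => [pre]
  | c :: rest => if c = '0' then pre :: pvSplit0 [] rest else pvSplit0 (pre ++ [c]) rest

theorem pvStepA_flush (cells : List Int) : ∀ (groups : List Int) (run : Int), 0 ≤ run →
    pvFlush (cells.foldl pvStepA (groups, run)) = groups ++ pvRunsF run cells := by
  induction cells with
  | nil =>
    intro groups run _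
    simp only [List.foldl_nil, pvFlush, pvRunsF]
    split_ifs <;> simp
  | cons c cs ih =>
    intro groups run hrun
    simp only [List.foldl_cons, pvStepA, pvRunsF]
    by_cases hc : c = 1
    · have hc' : (c == 1) = true := by simp [hc]
      rw [hc', if_pos rfl, if_pos hc]
      exact ih groups (run + 1) (by omega)
    · have hc' : (c == 1) = false := by simp [hc]
      rw [hc']
      simp only [Bool.false_eq_true, if_false, if_neg hc]
      by_cases hr : 0 < run
      · rw [if_pos hr, if_pos hr, ih (groups ++ [run]) 0 le_rfl]
        simp
      · have h0 : run = 0 := by omega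
        subst h0
        rw [if_neg hr, if_neg hr, ih groups 0 le_rfl]
        simp

-- the two defining equations of PySem.Chars.splitOn.go for sep = ['0'], by definitional unfolding
theorem pvGo_nil (n : Nat) (cur : List Char) (acc : List (List Char)) :
    PySem.Chars.splitOn.go ['0'] (n + 1) [] cur acc = (cur.reverse :: acc).reverse := rfl

theorem pvGo_cons (n : Nat) (c : Char) (rest cur : List Char) (acc : List (List Char)) :
    PySem.Chars.splitOn.go ['0'] (n + 1) (c :: rest) cur acc =
      if List.isPrefixOf ['0'] (c :: rest) = true
      then PySem.Chars.splitOn.go ['0'] n rest [] (cur.reverse :: acc)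
      else PySem.Chars.splitOn.go ['0'] n rest (c :: cur) acc := rfl

theorem pvGo_eq (fuel : Nat) : ∀ (l cur : List Char) (acc : List (List Char)), l.length < fuel →
    PySem.Chars.splitOn.go ['0'] fuel l cur acc = acc.reverse ++ pvSplit0 cur.reverse l := by
  induction fuel with
  | zero => intro l cur acc h; omega
  | succ n ih =>
    intro l cur acc h
    cases l with
    | nil => simp [pvGo_nil, pvSplit0]
    | cons c rest =>
      rw [pvGo_cons]
      by_cases hc : c = '0'
      · subst hc
        have hpre : List.isPrefixOf ['0'] ('0' :: rest) = true := by simp [List.isPrefixOf]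
        rw [if_pos hpre, ih rest [] _ (by simp at h ⊢; omega)]
        simp [pvSplit0]
      · have hpre : ¬ List.isPrefixOf ['0'] (c :: rest) = true := by
          simp [List.isPrefixOf]
          exact fun h => hc h.symm
        rw [if_neg hpre, ih rest (c :: cur) acc (by simp at h ⊢; omega)]
        simp [pvSplit0, hc]

theorem pvSplit0_runs (cells : List Int) : ∀ (pre : List Char),
    ((pvSplit0 pre (cells.map pvBit)).filter (fun p => !p.isEmpty)).map (fun p => (p.length : Int)) =
      pvRunsF (pre.length : Int) cells := by
  induction cells with
  | nil =>
    intro pre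
    cases pre <;> simp [pvSplit0, pvRunsF]
  | cons c cs ih =>
    intro pre
    by_cases hc : c = 1
    · have hb : pvBit c = '1' := by simp [pvBit, hc]
      have h1 : ¬ ('1' : Char) = '0' := by decide
      simp only [List.map_cons, hb, pvSplit0, if_neg h1, pvRunsF, if_pos hc]
      rw [ih (pre ++ ['1'])]
      congr 1
      simp [List.length_append]
    · have hb : pvBit c = '0' := by simp [pvBit, hc]
      simp only [List.map_cons, hb, pvSplit0, pvRunsF, if_neg hc, if_true]
      have h0 := ih []
      simp only [List.length_nil, Int.natCast_zero] at h0
      cases pre with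
      | nil => simp [h0]
      | cons p ps => simp [h0]

theorem pv_guard_eq (cells : List Int) :
    cells.contains (-1) = cells.any (fun c => c == -1) := by
  induction cells with
  | nil => rfl
  | cons c cs ih =>
    simp only [List.contains_cons, List.any_cons, ih]
    by_cases h : c = -1
    · simp [h]
    · have h' : ¬(-1 : Int) = c := fun h2 => h h2.symm
      rw [beq_eq_false_iff_ne.mpr h', beq_eq_false_iff_ne.mpr h]

-- ===== VERDICT (by name: the statement is the Claim_ definition above) =====
theorem line_satisfied_py_spec : Claim_equal_line_satisfied_py := by
  intro cells hints _
  unfold Spec_line_satisfied_py line_satisfied_py line_satisfied_py_alt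
  rw [pv_guard_eq]
  by_cases hg : cells.any (fun c => c == -1) = true
  · rw [if_pos hg, if_pos hg]
  · rw [if_neg hg, if_neg hg]
    have hA := pvStepA_flush cells [] 0 le_rfl
    have hB : PySem.Chars.splitOn (cells.map pvBit) ['0'] =
        pvSplit0 [] (cells.map pvBit) := by
      show PySem.Chars.splitOn.go _ _ _ _ _ = _
      rw [pvGo_eq _ _ _ _ (by omega)]
      simp
    have hC := pvSplit0_runs cells []
    simp only [List.length_nil, Int.natCast_zero] at hC
    rw [hB, hC, hA]
    simp
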